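-- pv_equiv track=rewrite | github.com/LiTing99-cutie/sORFs | 02-Mass-spec-20250723/analysis/20250910_c8_protein_map/scripts/count_theoretical_peptides.py | compute_cleavage_sites
-- ===== SOURCE A (Python) =====
-- def compute_cleavage_sites(seq: str, cterm:set, nterm:set, proline_block_cterm:bool=True):
--     s = (seq or "").strip().upper()
--     L = len(s)
--     cuts = set([0, L])
--     if L == 0:
--         return sorted(cuts)
--
--     # C 端切：after residue i；若启用阻断且下一个为 P，则不切
--     for i in range(L-1):
--         if s[i] in cterm:
--             if proline_block_cterm and s[i+1] == "P":
--                 continue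
--             cuts.add(i+1)
--
--     # N 端切：before residue i
--     for i in range(L):
--         if s[i] in nterm:
--             cuts.add(i)
--
--     return sorted(cuts)
-- ===== SOURCE B (Python) =====
-- def compute_cleavage_sites(seq: str, cterm: set, nterm: set, proline_block_cterm: bool = True):
--     s = (seq or "").strip().upper()
--     L = len(s)
--     # inverted index: residue letter -> list of its positions (one pass over s)
--     occ = {}
--     for i, ch in enumerate(s):
--         occ.setdefault(ch, []).append(i)
--     # boolean cut mask over positions 0..L
--     mask = [False] * (L + 1)
--     mask[0] = True
--     mask[L] = True
--     for aa in cterm: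
--         for i in occ.get(aa, []):
--             if i < L - 1:
--                 mask[i + 1] = True
--     if proline_block_cterm:
--         for i in occ.get("P", []):
--             if 0 < i:
--                 mask[i] = False
--     for aa in nterm:
--         for i in occ.get(aa, []):
--             mask[i] = True
--     return [p for p, m in enumerate(mask) if m]
-- ===== Notes on version B (the rewrite author's own statement) =====
-- stated objective: alternative
-- what changed: Instead of testing every residue for membership in cterm/nterm and accumulating cut positions in a set that is finally sorted, B builds an inverted index (letter -> list of positions) in one pass, then iterates over the enzyme letter sets themselves, marking/clearing cells of a boolean cut mask over positions 0..L (proline blocking becomes one clearing pass over the indexed positions of 'P'), and emits the marked positions in order with no set and no sort.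
import Mathlib
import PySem

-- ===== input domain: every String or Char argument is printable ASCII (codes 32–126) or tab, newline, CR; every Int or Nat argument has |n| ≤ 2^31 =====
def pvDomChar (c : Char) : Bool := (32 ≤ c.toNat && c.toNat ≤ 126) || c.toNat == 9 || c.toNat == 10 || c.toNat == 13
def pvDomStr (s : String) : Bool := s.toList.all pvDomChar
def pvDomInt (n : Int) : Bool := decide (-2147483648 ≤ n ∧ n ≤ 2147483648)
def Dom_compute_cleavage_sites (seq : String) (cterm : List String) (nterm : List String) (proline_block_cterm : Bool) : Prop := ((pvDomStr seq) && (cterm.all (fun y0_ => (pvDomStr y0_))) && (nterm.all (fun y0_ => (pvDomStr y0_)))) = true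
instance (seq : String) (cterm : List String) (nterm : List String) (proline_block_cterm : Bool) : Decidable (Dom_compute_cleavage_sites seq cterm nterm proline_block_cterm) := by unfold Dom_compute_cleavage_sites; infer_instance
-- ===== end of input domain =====

-- B replaces A's per-residue membership scans into a set plus a final sort by an inverted
-- index (letter -> positions) and a boolean cut mask iterated over the enzyme letters
-- themselves, emitting the positions in order (objective: alternative).

-- ===== PORT A =====
-- '(seq or "")' equals seq for strings except that '' stays '' — identical after strip,
-- so the port strips seq directly. Indices i and i+1 are always in range in A's loops,
-- so s[i] is ported as List.getD (exact there).
def compute_cleavage_sites (seq : String) (cterm : List String) (nterm : List String) (proline_block_cterm : Bool) : List Int :=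
  let s := PySem.Chars.upper (PySem.Chars.strip seq.toList)
  let L := s.length
  let cuts : PySem.Set Int := PySem.Set.add (PySem.Set.add PySem.Set.empty 0) (L : Int)
  if L = 0 then PySem.List.sorted cuts (fun x => x)
  else
    let cuts := (List.range (L - 1)).foldl (fun acc i =>
        if cterm.contains (String.ofList [s.getD i ' ']) then
          if proline_block_cterm && (s.getD (i + 1) ' ' == 'P') then acc
          else PySem.Set.add acc ((i : Int) + 1)
        else acc) cuts
    let cuts := (List.range L).foldl (fun acc i =>
        if nterm.contains (String.ofList [s.getD i ' ']) then PySem.Set.add acc (i : Int)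
        else acc) cuts
    PySem.List.sorted cuts (fun x => x)

-- ===== PORT B =====
-- occ.setdefault(ch, []).append(i) is Dict.modify ch [] (· ++ [i]); all mask indices
-- written by B are nonnegative and < len(mask), where pySetD is exact.
def compute_cleavage_sites_alt (seq : String) (cterm : List String) (nterm : List String) (proline_block_cterm : Bool) : List Int :=
  let s := PySem.Chars.upper (PySem.Chars.strip seq.toList)
  let L := s.length
  let occ : PySem.Dict String (List Int) :=
    (PySem.List.enumerate s).foldl
      (fun d x => PySem.Dict.modify d (String.ofList [x.2]) [] (· ++ [x.1])) PySem.Dict.empty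
  let mask : List Bool := List.replicate (L + 1) false
  let mask := PySem.List.pySetD mask 0 true
  let mask := PySem.List.pySetD mask (L : Int) true
  let mask := cterm.foldl (fun m aa =>
    (occ.getD aa []).foldl (fun m i =>
      if i < (L : Int) - 1 then PySem.List.pySetD m (i + 1) true else m) m) mask
  let mask := if proline_block_cterm then
      (occ.getD "P" []).foldl (fun m i =>
        if 0 < i then PySem.List.pySetD m i false else m) mask
    else mask
  let mask := nterm.foldl (fun m aa =>
    (occ.getD aa []).foldl (fun m i => PySem.List.pySetD m i true) m) mask
  ((PySem.List.enumerate mask).filter (fun x => x.2)).map (fun x => x.1)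

-- ===== PRECONDITION & SPEC =====
def Spec_compute_cleavage_sites (seq : String) (cterm : List String) (nterm : List String) (proline_block_cterm : Bool) (out : List Int) : Prop := out = compute_cleavage_sites_alt seq cterm nterm proline_block_cterm
instance (seq : String) (cterm : List String) (nterm : List String) (proline_block_cterm : Bool) (out : List Int) : Decidable (Spec_compute_cleavage_sites seq cterm nterm proline_block_cterm out) := by unfold Spec_compute_cleavage_sites; infer_instance

-- ===== CLAIM (what is proved, stated in full; the proofs are below) =====
def Claim_equal_compute_cleavage_sites : Prop := ∀ (seq : String) (cterm : List String) (nterm : List String) (proline_block_cterm : Bool), Dom_compute_cleavage_sites seq cterm nterm proline_block_cterm → Spec_compute_cleavage_sites seq cterm nterm proline_block_cterm (compute_cleavage_sites seq cterm nterm proline_block_cterm)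

-- ===== LEMMAS AND PROOFS =====

-- membership in a conditional fold of Set.add
theorem mem_foldl_set_add {β : Type} (l : List β) (c : β → Bool) (f : β → Int)
    (s : PySem.Set Int) (x : Int) :
    x ∈ l.foldl (fun acc i => if c i then PySem.Set.add acc (f i) else acc) s ↔
      x ∈ s ∨ ∃ i ∈ l, c i = true ∧ x = f i := by
  induction l generalizing s with
  | nil => simp
  | cons a t ih =>
    rw [List.foldl_cons]
    by_cases h : c a = true
    · rw [if_pos h, ih]
      simp only [List.mem_cons, PySem.Set.mem_add]
      constructor
      · rintro ((hs | rfl) | ⟨i, hi, hc, hx⟩)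
        · exact Or.inl hs
        · exact Or.inr ⟨a, Or.inl rfl, h, rfl⟩
        · exact Or.inr ⟨i, Or.inr hi, hc, hx⟩
      · rintro (hs | ⟨i, (rfl | hi), hc, hx⟩)
        · exact Or.inl (Or.inl hs)
        · exact Or.inl (Or.inr hx)
        · exact Or.inr ⟨i, hi, hc, hx⟩
    · rw [if_neg h, ih]
      simp only [List.mem_cons]
      constructor
      · rintro (hs | ⟨i, hi, hc, hx⟩)
        · exact Or.inl hs
        · exact Or.inr ⟨i, Or.inr hi, hc, hx⟩
      · rintro (hs | ⟨i, (rfl | hi), hc, hx⟩)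
        · exact Or.inl hs
        · exact absurd hc h
        · exact Or.inr ⟨i, hi, hc, hx⟩

theorem nodup_foldl_set_add {β : Type} (l : List β) (c : β → Bool) (f : β → Int)
    (s : PySem.Set Int) (hs : s.Nodup) :
    (l.foldl (fun acc i => if c i then PySem.Set.add acc (f i) else acc) s).Nodup := by
  induction l generalizing s with
  | nil => exact hs
  | cons a t ih =>
    simp only [List.foldl_cons]
    by_cases h : c a = true
    · simp only [h, if_true]
      exact ih _ (PySem.Set.nodup_add _ _ hs)
    · rw [if_neg h]
      exact ih _ hs

-- the core equality, over abstract per-position tests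
theorem cut_core (L : Nat) (hL : L ≠ 0) (ctf pbf ntf : Nat → Bool) :
    PySem.List.sorted
      ((List.range L).foldl (fun acc i => if ntf i then PySem.Set.add acc (i : Int) else acc)
        ((List.range (L - 1)).foldl
          (fun acc i => if (ctf i && !pbf (i + 1)) then PySem.Set.add acc ((i : Int) + 1) else acc)
          [0, (L : Int)]))
      (fun x => x)
    = ((List.range (L + 1)).filter
        (fun p => p == 0 || p == L || (ctf (p - 1) && !pbf p) || ntf p)).map (fun (p : Nat) => (p : Int)) := by
  have hLInt : ((L : Int)) ≠ 0 := by exact_mod_cast hL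
  have hpairF : ((List.range (L + 1)).filter
      (fun p => p == 0 || p == L || (ctf (p - 1) && !pbf p) || ntf p)).Pairwise (· < ·) :=
    List.Pairwise.sublist List.filter_sublist List.pairwise_lt_range
  have hpairB : (((List.range (L + 1)).filter
      (fun p => p == 0 || p == L || (ctf (p - 1) && !pbf p) || ntf p)).map
        (fun (p : Nat) => (p : Int))).Pairwise (· < ·) := by
    refine List.Pairwise.map _ ?_ hpairF
    intro a b hab; exact_mod_cast hab
  refine PySem.List.sorted_eq_of_perm_of_pairwise_lt _ _ _ ?_ ?_
  · -- the Perm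
    have hnodupB : (((List.range (L + 1)).filter
        (fun p => p == 0 || p == L || (ctf (p - 1) && !pbf p) || ntf p)).map
          (fun (p : Nat) => (p : Int))).Nodup :=
      hpairB.imp (fun h => ne_of_lt h)
    have hnodupC : ((List.range L).foldl
        (fun acc i => if ntf i then PySem.Set.add acc (i : Int) else acc)
        ((List.range (L - 1)).foldl
          (fun acc i => if (ctf i && !pbf (i + 1)) then PySem.Set.add acc ((i : Int) + 1) else acc)
          [0, (L : Int)])).Nodup := by
      apply nodup_foldl_set_add
      apply nodup_foldl_set_add
      simp
      exact fun h => hLInt h.symm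
    rw [List.perm_ext_iff_of_nodup hnodupB hnodupC]
    intro x
    rw [mem_foldl_set_add, mem_foldl_set_add]
    simp only [List.mem_map, List.mem_filter, List.mem_range, List.mem_cons,
      List.not_mem_nil, or_false, Bool.or_eq_true, Bool.and_eq_true, beq_iff_eq,
      Bool.not_eq_true']
    constructor
    · rintro ⟨p, ⟨hp, hc⟩, rfl⟩
      rcases hc with (((rfl | rfl) | ⟨h1, h2⟩) | hn)
      · exact Or.inl (Or.inl (Or.inl (by simp)))
      · exact Or.inl (Or.inl (Or.inr rfl))
      · by_cases hp0 : p = 0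
        · exact Or.inl (Or.inl (Or.inl (by simp [hp0])))
        · by_cases hpL : p = L
          · exact Or.inl (Or.inl (Or.inr (by simp [hpL])))
          · refine Or.inl (Or.inr ⟨p - 1, by omega, ⟨h1, ?_⟩, by omega⟩)
            have hpp : p - 1 + 1 = p := by omega
            rw [hpp]; exact h2
      · by_cases hpL : p = L
        · exact Or.inl (Or.inl (Or.inr (by simp [hpL])))
        · exact Or.inr ⟨p, by omega, hn, rfl⟩
    · rintro (((rfl | rfl) | ⟨i, hi, ⟨h1, h2⟩, rfl⟩) | ⟨i, hi, hn, rfl⟩)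
      · exact ⟨0, ⟨by omega, Or.inl (Or.inl (Or.inl rfl))⟩, by simp⟩
      · exact ⟨L, ⟨by omega, Or.inl (Or.inl (Or.inr rfl))⟩, rfl⟩
      · refine ⟨i + 1, ⟨by omega, Or.inl (Or.inr ⟨?_, ?_⟩)⟩, by omega⟩
        · simpa using h1
        · simpa using h2
      · exact ⟨i, ⟨by omega, Or.inr hn⟩, rfl⟩
  · exact hpairB

-- glue: port A on an arbitrary prepared character list equals the in-order filter form
theorem cleavage_key (s : List Char) (cterm nterm : List String) (pb : Bool) :
    (if s.length = 0 then
      PySem.List.sorted (PySem.Set.add (PySem.Set.add PySem.Set.empty 0) (s.length : Int)) (fun x => x)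
    else
      PySem.List.sorted
        ((List.range s.length).foldl
          (fun acc i => if nterm.contains (String.ofList [s.getD i ' ']) then PySem.Set.add acc (i : Int) else acc)
          ((List.range (s.length - 1)).foldl
            (fun acc i =>
              if cterm.contains (String.ofList [s.getD i ' ']) then
                if pb && (s.getD (i + 1) ' ' == 'P') then acc
                else PySem.Set.add acc ((i : Int) + 1)
              else acc)
            (PySem.Set.add (PySem.Set.add PySem.Set.empty 0) (s.length : Int))))
        (fun x => x))
    = ((List.range (s.length + 1)).filter (fun p =>
        p == 0 || p == s.length ||
        (cterm.contains (String.ofList [s.getD (p - 1) ' ']) && !(pb && (s.getD p ' ' == 'P'))) ||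
        nterm.contains (String.ofList [s.getD p ' ']))).map (fun (p : Nat) => (p : Int)) := by
  by_cases hL : s.length = 0
  · rw [if_pos hL]
    simp only [hL, List.range_one]
    have hlhs : PySem.List.sorted (PySem.Set.add (PySem.Set.add PySem.Set.empty 0) ((0 : Nat) : Int))
        (fun x => x) = [0] := by decide
    rw [hlhs]
    simp
  · rw [if_neg hL]
    have hbase : PySem.Set.add (PySem.Set.add PySem.Set.empty 0) ((s.length : Nat) : Int)
        = [0, (s.length : Int)] := by
      have hne : ¬ s = [] := fun h => hL (by simp [h])
      simp [PySem.Set.add, PySem.Set.empty, hne]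
    have hfun : (fun (acc : PySem.Set Int) i =>
        if cterm.contains (String.ofList [s.getD i ' ']) then
          if pb && (s.getD (i + 1) ' ' == 'P') then acc
          else PySem.Set.add acc ((i : Int) + 1)
        else acc)
        = (fun acc i =>
            if (cterm.contains (String.ofList [s.getD i ' ']) && !(pb && (s.getD (i + 1) ' ' == 'P'))) then
              PySem.Set.add acc ((i : Int) + 1)
            else acc) := by
      funext acc i
      cases hc : cterm.contains (String.ofList [s.getD i ' ']) <;>
        cases hp : (pb && (s.getD (i + 1) ' ' == 'P')) <;>
          simp only [hc, hp, Bool.and_false, Bool.and_true, Bool.not_false, Bool.not_true,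
            Bool.false_eq_true, if_false, if_true, ite_self]
    rw [hbase, hfun]
    exact cut_core s.length hL
      (fun j => cterm.contains (String.ofList [s.getD j ' ']))
      (fun j => pb && (s.getD j ' ' == 'P'))
      (fun j => nterm.contains (String.ofList [s.getD j ' ']))

-- ===== B-side lemmas =====

-- conditional pySetD fold: length is preserved
theorem length_foldl_mark (l : List Int) (c : Int → Prop) [DecidablePred c] (g : Int → Int)
    (b : Bool) (m : List Bool) :
    (l.foldl (fun m i => if c i then PySem.List.pySetD m (g i) b else m) m).length = m.length := by
  induction l generalizing m with
  | nil => rfl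
  | cons a t ih =>
    simp only [List.foldl_cons]
    by_cases h : c a
    · rw [if_pos h, ih, PySem.List.length_pySetD]
    · rw [if_neg h, ih]

-- conditional pySetD fold: value at a position
theorem getD_foldl_mark (l : List Int) (c : Int → Prop) [DecidablePred c] (g : Int → Int)
    (b : Bool) (m : List Bool) (p : Nat)
    (hg : ∀ i ∈ l, c i → 0 ≤ g i ∧ (g i).toNat < m.length) :
    (l.foldl (fun m i => if c i then PySem.List.pySetD m (g i) b else m) m).getD p false
      = if l.any (fun i => decide (c i) && g i == (p : Int)) then b else m.getD p false := by
  induction l generalizing m with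
  | nil => simp
  | cons a t ih =>
    simp only [List.foldl_cons, List.any_cons]
    by_cases h : c a
    · have hga := hg a (List.mem_cons_self ..) h
      rw [if_pos h, PySem.List.pySetD_of_nonneg m b hga.1,
        ih _ (fun i hi hci => by
          simpa using hg i (List.mem_cons_of_mem _ hi) hci)]
      by_cases ht : t.any (fun i => decide (c i) && g i == (p : Int)) = true
      · simp [h, ht]
      · have ht' : (t.any (fun i => decide (c i) && g i == (p : Int))) = false :=
          Bool.eq_false_iff.mpr ht
        by_cases hp : (g a == (p : Int)) = true
        · have hpe : (g a).toNat = p := by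
            have h1 := beq_iff_eq.mp hp
            have h2 := hga.1
            omega
          have hlt : p < m.length := hpe ▸ hga.2
          simp only [h, hp, ht', decide_true, Bool.true_and, Bool.true_or, if_true,
            Bool.or_false, Bool.false_eq_true, if_false]
          rw [hpe, List.getD_eq_getElem?_getD, List.getElem?_set_self hlt]
          rfl
        · have hp' : (g a == (p : Int)) = false := Bool.eq_false_iff.mpr hp
          have hpne : (g a).toNat ≠ p := by
            intro he
            have h2 := hga.1
            exact hp (beq_iff_eq.mpr (by omega))
          simp only [h, hp', ht', decide_true, Bool.true_and, Bool.and_false, Bool.or_self,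
            Bool.false_eq_true, if_false]
          rw [List.getD_eq_getElem?_getD, List.getD_eq_getElem?_getD,
            List.getElem?_set_ne hpne]
    · have h' : decide (c a) = false := by simpa using h
      rw [if_neg h, ih _ (fun i hi hci => hg i (List.mem_cons_of_mem _ hi) hci)]
      simp [h']

-- the inverted index (proof-side name for B's occ dictionary)
def occF (s : List Char) : PySem.Dict String (List Int) :=
  (PySem.List.enumerate s).foldl
    (fun d x => PySem.Dict.modify d (String.ofList [x.2]) [] (· ++ [x.1])) PySem.Dict.empty

-- positions of a letter, in order
theorem occ_getD (s : List Char) (aa : String) :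
    (occF s).getD aa []
      = ((PySem.List.enumerate s).filter (fun x => String.ofList [x.2] == aa)).map (fun x => x.1) := by
  have h1 : occF s
      = (((PySem.List.enumerate s).map (fun x => (String.ofList [x.2], x.1))).foldl
          (fun d q => PySem.Dict.modify d q.1 [] (· ++ [q.2])) PySem.Dict.empty) := by
    rw [occF, List.foldl_map]
  rw [h1, PySem.Dict.getD_foldl_modify_append, PySem.Dict.getD_empty, List.nil_append,
    List.filter_map, List.map_map]
  rfl

-- membership in the inverted index
theorem mem_occ_getD (s : List Char) (aa : String) (i : Int) :
    i ∈ (occF s).getD aa []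
      ↔ ∃ k : Nat, k < s.length ∧ i = (k : Int) ∧ String.ofList [s.getD k ' '] = aa := by
  rw [occ_getD]
  simp only [List.mem_map, List.mem_filter, PySem.List.mem_enumerate_iff, beq_iff_eq]
  constructor
  · rintro ⟨x, ⟨⟨k, hk, rfl⟩, hkey⟩, rfl⟩
    refine ⟨k, hk, by simp, ?_⟩
    rw [List.getD_eq_getElem _ _ hk]
    simpa using hkey
  · rintro ⟨k, hk, rfl, hkey⟩
    refine ⟨((k : Int), s[k]), ⟨⟨k, hk, by simp⟩, ?_⟩, rfl⟩
    rw [List.getD_eq_getElem _ _ hk] at hkey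
    simpa using hkey

-- index bounds of the inverted index
theorem occ_bounds (s : List Char) (aa : String) :
    ∀ i ∈ (occF s).getD aa [], 0 ≤ i ∧ i.toNat < s.length := by
  intro i hi
  rcases (mem_occ_getD s aa i).mp hi with ⟨k, hk, rfl, -⟩
  constructor
  · exact Int.natCast_nonneg k
  · simpa using hk

-- unconditional pySetD fold: length and value
theorem length_foldl_set (l : List Int) (m : List Bool) :
    (l.foldl (fun m i => PySem.List.pySetD m i true) m).length = m.length := by
  induction l generalizing m with
  | nil => rfl
  | cons a t ih => rw [List.foldl_cons, ih, PySem.List.length_pySetD]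

theorem getD_foldl_set (l : List Int) (m : List Bool) (p : Nat)
    (hg : ∀ i ∈ l, 0 ≤ i ∧ i.toNat < m.length) :
    (l.foldl (fun m i => PySem.List.pySetD m i true) m).getD p false
      = if l.any (fun i => i == (p : Int)) then true else m.getD p false := by
  induction l generalizing m with
  | nil => simp
  | cons a t ih =>
    simp only [List.foldl_cons, List.any_cons]
    have hga := hg a (List.mem_cons_self ..)
    rw [PySem.List.pySetD_of_nonneg m true hga.1,
      ih _ (fun i hi => by simpa using hg i (List.mem_cons_of_mem _ hi))]
    by_cases ht : t.any (fun i => i == (p : Int)) = true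
    · simp [ht]
    · have ht' : (t.any (fun i => i == (p : Int))) = false := Bool.eq_false_iff.mpr ht
      by_cases hpa : (a == (p : Int)) = true
      · have hpe : a.toNat = p := by
          have h1 := beq_iff_eq.mp hpa
          have h2 := hga.1
          omega
        have hlt : p < m.length := hpe ▸ hga.2
        simp only [hpa, ht', Bool.true_or, if_true, Bool.or_false, Bool.false_eq_true, if_false]
        rw [hpe, List.getD_eq_getElem?_getD, List.getElem?_set_self hlt]
        rfl
      · have hpa' : (a == (p : Int)) = false := Bool.eq_false_iff.mpr hpa
        have hpne : a.toNat ≠ p := by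
          intro he
          have h2 := hga.1
          exact hpa (beq_iff_eq.mpr (by omega))
        simp only [hpa', ht', Bool.or_self, Bool.false_eq_true, if_false]
        rw [List.getD_eq_getElem?_getD, List.getD_eq_getElem?_getD,
          List.getElem?_set_ne hpne]

-- outer loops: lengths are preserved
theorem length_foldl_mark_outer (ls : List String) (pos : String → List Int)
    (c : Int → Prop) [DecidablePred c] (g : Int → Int) (m : List Bool) :
    (ls.foldl (fun m aa =>
        (pos aa).foldl (fun m i => if c i then PySem.List.pySetD m (g i) true else m) m) m).length
      = m.length := by
  induction ls generalizing m with
  | nil => rfl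
  | cons aa t ih => rw [List.foldl_cons, ih, length_foldl_mark]

theorem length_foldl_set_outer (ls : List String) (pos : String → List Int) (m : List Bool) :
    (ls.foldl (fun m aa => (pos aa).foldl (fun m i => PySem.List.pySetD m i true) m) m).length
      = m.length := by
  induction ls generalizing m with
  | nil => rfl
  | cons aa t ih => rw [List.foldl_cons, ih, length_foldl_set]

-- outer conditional marking loop (b = true): value at a position
theorem getD_foldl_mark_outer (ls : List String) (pos : String → List Int)
    (c : Int → Prop) [DecidablePred c] (g : Int → Int) (m : List Bool) (p : Nat)
    (hg : ∀ aa, ∀ i ∈ pos aa, c i → 0 ≤ g i ∧ (g i).toNat < m.length) :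
    (ls.foldl (fun m aa =>
        (pos aa).foldl (fun m i => if c i then PySem.List.pySetD m (g i) true else m) m) m).getD p false
      = if ls.any (fun aa => (pos aa).any (fun i => decide (c i) && g i == (p : Int))) then true
        else m.getD p false := by
  induction ls generalizing m with
  | nil => simp
  | cons aa t ih =>
    simp only [List.foldl_cons, List.any_cons]
    rw [ih _ (fun bb i hi hci => by rw [length_foldl_mark]; exact hg bb i hi hci),
      getD_foldl_mark _ _ _ _ _ _ (hg aa)]
    by_cases h1 : (pos aa).any (fun i => decide (c i) && g i == (p : Int)) = true <;>
    by_cases h2 : t.any (fun bb => (pos bb).any (fun i => decide (c i) && g i == (p : Int))) = true <;>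
      simp [h1, h2]

-- outer unconditional marking loop: value at a position
theorem getD_foldl_set_outer (ls : List String) (pos : String → List Int) (m : List Bool) (p : Nat)
    (hg : ∀ aa, ∀ i ∈ pos aa, 0 ≤ i ∧ i.toNat < m.length) :
    (ls.foldl (fun m aa => (pos aa).foldl (fun m i => PySem.List.pySetD m i true) m) m).getD p false
      = if ls.any (fun aa => (pos aa).any (fun i => i == (p : Int))) then true
        else m.getD p false := by
  induction ls generalizing m with
  | nil => simp
  | cons aa t ih =>
    simp only [List.foldl_cons, List.any_cons]
    rw [ih _ (fun bb i hi => by rw [length_foldl_set]; exact hg bb i hi),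
      getD_foldl_set _ _ _ (hg aa)]
    by_cases h1 : (pos aa).any (fun i => i == (p : Int)) = true <;>
    by_cases h2 : t.any (fun bb => (pos bb).any (fun i => i == (p : Int))) = true <;>
      simp [h1, h2]

-- the base mask: boundaries only
theorem getD_base_mask (L p : Nat) (hp : p ≤ L) :
    (PySem.List.pySetD (PySem.List.pySetD (List.replicate (L + 1) false) 0 true) (L : Int) true).getD p false
      = (p == 0 || p == L) := by
  have h0 : ((0 : Int)) = ((0 : Nat) : Int) := rfl
  rw [h0, PySem.List.pySetD_natCast, PySem.List.pySetD_natCast, List.getD_eq_getElem?_getD]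
  by_cases hpL : p = L
  · subst hpL
    rw [List.getElem?_set_self (by simp)]
    simp
  · rw [List.getElem?_set_ne (fun he => hpL he.symm)]
    by_cases hp0 : p = 0
    · subst hp0
      rw [List.getElem?_set_self (by simp)]
      simp
    · rw [List.getElem?_set_ne (fun he => hp0 he.symm)]
      rw [List.getElem?_replicate, if_pos (by omega)]
      simp [hp0, hpL]

-- the emitted positions of a boolean mask, in order
theorem out_of_mask (mask : List Bool) :
    ((PySem.List.enumerate mask).filter (fun x => x.2)).map (fun x => x.1)
      = ((List.range mask.length).filter (fun p => mask.getD p false)).map (fun p : Nat => (p : Int)) := by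
  rw [PySem.List.enumerate_eq_map_pyRange mask false, List.filter_map, List.map_map,
    PySem.List.pyRange_one, List.filter_map, List.map_map]
  have hn : (((PySem.List.len mask) : Int) - 0).toNat = mask.length := by
    simp [PySem.List.len]
  rw [hn]
  simp only [Function.comp_def]
  have hpq : ∀ k ∈ List.range mask.length,
      (PySem.List.pyGetD mask ((0 : Int) + (k : Int)) false) = mask.getD k false := by
    intro k hk
    rw [zero_add, PySem.List.pyGetD_natCast]
  rw [List.filter_congr hpq]
  apply List.map_congr_left
  intro k hk
  simp

-- proof-side names for B's mask stages
def maskB (s : List Char) : List Bool :=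
  PySem.List.pySetD (PySem.List.pySetD (List.replicate (s.length + 1) false) 0 true)
    ((s.length : Nat) : Int) true

def maskC (s : List Char) (cterm : List String) : List Bool :=
  cterm.foldl (fun m aa =>
    ((occF s).getD aa []).foldl (fun m i =>
      if i < (s.length : Int) - 1 then PySem.List.pySetD m (i + 1) true else m) m) (maskB s)

def maskP (s : List Char) (cterm : List String) (pb : Bool) : List Bool :=
  if pb then
    ((occF s).getD "P" []).foldl (fun m i =>
      if 0 < i then PySem.List.pySetD m i false else m) (maskC s cterm)
  else maskC s cterm

def maskN (s : List Char) (cterm nterm : List String) (pb : Bool) : List Bool :=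
  nterm.foldl (fun m aa =>
    ((occF s).getD aa []).foldl (fun m i => PySem.List.pySetD m i true) m) (maskP s cterm pb)

theorem length_maskB (s : List Char) : (maskB s).length = s.length + 1 := by
  rw [maskB, PySem.List.length_pySetD, PySem.List.length_pySetD, List.length_replicate]

theorem length_maskC (s : List Char) (cterm : List String) :
    (maskC s cterm).length = s.length + 1 := by
  rw [maskC, length_foldl_mark_outer, length_maskB]

theorem length_maskP (s : List Char) (cterm : List String) (pb : Bool) :
    (maskP s cterm pb).length = s.length + 1 := by
  rw [maskP]
  by_cases h : pb = true
  · rw [if_pos h, length_foldl_mark, length_maskC]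
  · rw [if_neg h, length_maskC]

-- iff forms of the three any-tests
theorem ct_any_iff (s : List Char) (cterm : List String) (p : Nat) :
    (cterm.any (fun aa => ((occF s).getD aa []).any
        (fun i => decide (i < (s.length : Int) - 1) && (i + 1 == (p : Int))))) = true
      ↔ (1 ≤ p ∧ p < s.length ∧ String.ofList [s.getD (p - 1) ' '] ∈ cterm) := by
  simp only [List.any_eq_true, Bool.and_eq_true, decide_eq_true_iff, beq_iff_eq]
  constructor
  · rintro ⟨aa, haa, i, hi, hlt, hip⟩
    rcases (mem_occ_getD s aa i).mp hi with ⟨k, hk, rfl, hkey⟩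
    have h1 : 1 ≤ p := by omega
    have h2 : p < s.length := by omega
    have h3 : k = p - 1 := by omega
    exact ⟨h1, h2, by rw [← h3, hkey]; exact haa⟩
  · rintro ⟨h1, h2, hmem⟩
    refine ⟨String.ofList [s.getD (p - 1) ' '], hmem, ((p - 1 : Nat) : Int),
      (mem_occ_getD s _ _).mpr ⟨p - 1, by omega, rfl, rfl⟩, by omega, by omega⟩

theorem pp_any_iff (s : List Char) (p : Nat) :
    (((occF s).getD "P" []).any (fun i => decide (0 < i) && (i == (p : Int)))) = true
      ↔ (1 ≤ p ∧ p < s.length ∧ s.getD p ' ' = 'P') := by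
  simp only [List.any_eq_true, Bool.and_eq_true, decide_eq_true_iff, beq_iff_eq]
  constructor
  · rintro ⟨i, hi, hpos, hip⟩
    rcases (mem_occ_getD s _ i).mp hi with ⟨k, hk, rfl, hkey⟩
    refine ⟨by omega, by omega, ?_⟩
    have hkp : k = p := by omega
    rw [← hkp]
    have h2 : [s.getD k ' '] = ['P'] := by
      have h3 := congrArg String.toList hkey
      simpa using h3
    simpa using h2
  · rintro ⟨h1, h2, hP⟩
    refine ⟨(p : Int), (mem_occ_getD s _ _).mpr ⟨p, h2, rfl, by rw [hP]⟩, by omega, rfl⟩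

theorem nt_any_iff (s : List Char) (nterm : List String) (p : Nat) :
    (nterm.any (fun aa => ((occF s).getD aa []).any (fun i => i == (p : Int)))) = true
      ↔ (p < s.length ∧ String.ofList [s.getD p ' '] ∈ nterm) := by
  simp only [List.any_eq_true, beq_iff_eq]
  constructor
  · rintro ⟨aa, haa, i, hi, hip⟩
    rcases (mem_occ_getD s aa i).mp hi with ⟨k, hk, rfl, hkey⟩
    have hkp : k = p := by omega
    exact ⟨by omega, by rw [← hkp, hkey]; exact haa⟩
  · rintro ⟨h1, hmem⟩
    exact ⟨String.ofList [s.getD p ' '], hmem, (p : Int),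
      (mem_occ_getD s _ _).mpr ⟨p, h1, rfl, rfl⟩, rfl⟩

-- value of the C-terminal stage
theorem maskC_getD (s : List Char) (cterm : List String) (p : Nat) (hp : p ≤ s.length) :
    (maskC s cterm).getD p false
      = (p == 0 || p == s.length ||
          (decide (1 ≤ p) && decide (p < s.length) &&
            cterm.contains (String.ofList [s.getD (p - 1) ' ']))) := by
  have hgC : ∀ aa, ∀ i ∈ (occF s).getD aa [],
      i < (s.length : Int) - 1 → 0 ≤ i + 1 ∧ (i + 1).toNat < (maskB s).length := by
    intro aa i hi hc
    have h1 := occ_bounds s aa i hi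
    rw [length_maskB]
    omega
  rw [maskC, getD_foldl_mark_outer _ _ _ _ _ _ hgC]
  have hbase : (maskB s).getD p false = (p == 0 || p == s.length) := getD_base_mask s.length p hp
  by_cases hc : (cterm.any (fun aa => ((occF s).getD aa []).any
      (fun i => decide (i < (s.length : Int) - 1) && (i + 1 == (p : Int))))) = true
  · rcases (ct_any_iff s cterm p).mp hc with ⟨h1, h2, h3⟩
    have h4 : cterm.contains (String.ofList [s.getD (p - 1) ' ']) = true := by
      simpa using h3
    rw [if_pos hc, h4, decide_eq_true h1, decide_eq_true h2]
    simp
  · rw [if_neg hc, hbase]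
    by_cases h1 : 1 ≤ p
    · by_cases h2 : p < s.length
      · have h3 : cterm.contains (String.ofList [s.getD (p - 1) ' ']) = false := by
          refine Bool.eq_false_iff.mpr (fun hmem => hc ((ct_any_iff s cterm p).mpr ⟨h1, h2, ?_⟩))
          simpa using hmem
        rw [h3, Bool.and_false, Bool.or_false]
      · rw [decide_eq_false h2, Bool.and_false, Bool.false_and, Bool.or_false]
    · rw [decide_eq_false h1, Bool.false_and, Bool.false_and, Bool.or_false]

-- value of the proline-blocking stage
theorem maskP_getD (s : List Char) (cterm : List String) (pb : Bool) (p : Nat)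
    (hp : p ≤ s.length) :
    (maskP s cterm pb).getD p false
      = (if pb && (decide (1 ≤ p) && decide (p < s.length) && decide (s.getD p ' ' = 'P')) then false
         else (maskC s cterm).getD p false) := by
  have hgP : ∀ i ∈ (occF s).getD "P" [],
      0 < i → 0 ≤ i ∧ i.toNat < (maskC s cterm).length := by
    intro i hi _
    have h1 := occ_bounds s "P" i hi
    rw [length_maskC]
    omega
  rw [maskP]
  by_cases hpb : pb = true
  · rw [if_pos hpb, getD_foldl_mark _ _ _ _ _ _ hgP, hpb]
    by_cases hP : (((occF s).getD "P" []).any (fun i => decide (0 < i) && (i == (p : Int)))) = true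
    · rcases (pp_any_iff s p).mp hP with ⟨h1, h2, h3⟩
      rw [if_pos hP, if_pos]
      rw [decide_eq_true h1, decide_eq_true h2, decide_eq_true h3]
      simp
    · rw [if_neg hP, if_neg]
      intro hcond
      apply hP
      apply (pp_any_iff s p).mpr
      simp only [Bool.true_and, Bool.and_eq_true, decide_eq_true_iff] at hcond
      exact ⟨hcond.1.1, hcond.1.2, hcond.2⟩
  · have hpb' : pb = false := Bool.eq_false_iff.mpr hpb
    rw [if_neg hpb, hpb', Bool.false_and, if_neg (by simp)]

-- the heart: the final mask holds the filter-form predicate at every position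
theorem maskN_getD (s : List Char) (cterm nterm : List String) (pb : Bool) (p : Nat)
    (hp : p ≤ s.length) :
    (maskN s cterm nterm pb).getD p false
      = (p == 0 || p == s.length ||
          (cterm.contains (String.ofList [s.getD (p - 1) ' ']) && !(pb && (s.getD p ' ' == 'P'))) ||
          nterm.contains (String.ofList [s.getD p ' '])) := by
  have hgN : ∀ aa, ∀ i ∈ (occF s).getD aa [], 0 ≤ i ∧ i.toNat < (maskP s cterm pb).length := by
    intro aa i hi
    have h1 := occ_bounds s aa i hi
    rw [length_maskP]
    omega
  rw [maskN, getD_foldl_set_outer _ _ _ _ hgN]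
  by_cases hnt : (nterm.any (fun aa => ((occF s).getD aa []).any (fun i => i == (p : Int)))) = true
  · rcases (nt_any_iff s nterm p).mp hnt with ⟨h1, h2⟩
    have h3 : nterm.contains (String.ofList [s.getD p ' ']) = true := by simpa using h2
    rw [if_pos hnt, h3]
    simp
  · rw [if_neg hnt, maskP_getD s cterm pb p hp, maskC_getD s cterm p hp]
    by_cases h2 : p < s.length
    · have hn3 : nterm.contains (String.ofList [s.getD p ' ']) = false := by
        refine Bool.eq_false_iff.mpr (fun hmem => hnt ((nt_any_iff s nterm p).mpr ⟨h2, ?_⟩))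
        simpa using hmem
      rw [hn3, Bool.or_false, decide_eq_true h2]
      by_cases h1 : 1 ≤ p
      · have hp0 : (p == 0) = false := beq_eq_false_iff_ne.mpr (by omega)
        have hpL : (p == s.length) = false := beq_eq_false_iff_ne.mpr (by omega)
        rw [decide_eq_true h1, hp0, hpL]
        by_cases hP : s.getD p ' ' = 'P'
        · have hPd : decide (s.getD p ' ' = 'P') = true := decide_eq_true hP
          have hPe : (s.getD p ' ' == 'P') = true := beq_iff_eq.mpr hP
          rw [hPd, hPe]
          cases pb
          · simp
          · simp
        · have hPd : decide (s.getD p ' ' = 'P') = false := decide_eq_false hP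
          have hPe : (s.getD p ' ' == 'P') = false := beq_eq_false_iff_ne.mpr hP
          rw [hPd, hPe]
          simp
      · have hp0 : p = 0 := by omega
        subst hp0
        rw [if_neg (by simp)]
        simp
    · have hpL : p = s.length := by omega
      have h4 : decide (p < s.length) = false := decide_eq_false h2
      rw [h4, Bool.and_false, Bool.false_and, Bool.and_false, if_neg (by simp),
        show (p == s.length) = true from beq_iff_eq.mpr hpL]
      simp

-- port B on an arbitrary prepared character list equals the in-order filter form
theorem alt_key (s : List Char) (cterm nterm : List String) (pb : Bool) :
    ((PySem.List.enumerate (maskN s cterm nterm pb)).filter (fun x => x.2)).map (fun x => x.1)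
      = ((List.range (s.length + 1)).filter (fun p =>
          p == 0 || p == s.length ||
          (cterm.contains (String.ofList [s.getD (p - 1) ' ']) && !(pb && (s.getD p ' ' == 'P'))) ||
          nterm.contains (String.ofList [s.getD p ' ']))).map (fun (p : Nat) => (p : Int)) := by
  rw [out_of_mask]
  have hlen : (maskN s cterm nterm pb).length = s.length + 1 := by
    rw [maskN, length_foldl_set_outer, length_maskP]
  rw [hlen]
  rw [List.filter_congr (fun p hp => maskN_getD s cterm nterm pb p
    (by simp only [List.mem_range] at hp; omega))]

-- ===== VERDICT (by name: the statement is the Claim_ definition above) =====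
theorem compute_cleavage_sites_spec : Claim_equal_compute_cleavage_sites := by
  intro seq cterm nterm pb _
  unfold Spec_compute_cleavage_sites compute_cleavage_sites compute_cleavage_sites_alt
  exact (cleavage_key (PySem.Chars.upper (PySem.Chars.strip seq.toList)) cterm nterm pb).trans
    (alt_key (PySem.Chars.upper (PySem.Chars.strip seq.toList)) cterm nterm pb).symm
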